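-- pv_equiv track=rewrite | github.com/Masterace12/-Machine-Learning-Shader-Prediction-Compiler | security/spv_static_analyzer.py | _match_instruction_pattern
-- ===== SOURCE A (Python) =====
-- from typing import Dict, List, Tuple, Optional, Set, Any, Union
--
-- def _match_instruction_pattern(instructions: List[Dict], pattern: List[int]) -> Tuple[bool, str]:
--     """Match a specific instruction pattern"""
--     if len(pattern) > len(instructions):
--         return False, ""
--
--     for i in range(len(instructions) - len(pattern) + 1):
--         match = True
--         for j, expected_opcode in enumerate(pattern):
--             if instructions[i + j]['opcode'] != expected_opcode:
--                 match = False
--                 break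
--
--         if match:
--             return True, f"Pattern matched at offset {instructions[i]['offset']}"
--
--     return False, ""
-- ===== SOURCE B (Python) =====
-- from typing import Dict, List, Tuple
--
-- def _match_instruction_pattern(instructions: List[Dict], pattern: List[int]) -> Tuple[bool, str]:
--     """Rabin-Karp: single rolling-hash pass over the opcode sequence, verifying on hash hits.
--     Opcodes are read with .get (a missing 'opcode' simply never matches an int)."""
--     n, m = len(instructions), len(pattern)
--     if m > n:
--         return False, ""
--     if m == 0:
--         return True, f"Pattern matched at offset {instructions[0]['offset']}"
--     MOD = (1 << 61) - 1
--     BASE = 1 << 8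
--     opcodes = [ins.get('opcode') for ins in instructions]
--     vals = [x if isinstance(x, int) else 0 for x in opcodes]
--     h_pat = 0
--     for x in pattern:
--         h_pat = (h_pat * BASE + x) % MOD
--     h = 0
--     for x in vals[:m]:
--         h = (h * BASE + x) % MOD
--     p = pow(BASE, m - 1, MOD)
--     i = 0
--     while True:
--         if h == h_pat and opcodes[i:i + m] == pattern:
--             return True, f"Pattern matched at offset {instructions[i]['offset']}"
--         if i == n - m:
--             return False, ""
--         h = ((h - vals[i] * p) * BASE + vals[i + m]) % MOD
--         i += 1
-- ===== Notes on version B (the rewrite author's own statement) =====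
-- stated objective: alternative
-- what changed: Replaces the nested window-by-window opcode comparison with a single-pass Rabin-Karp search (one rolling polynomial hash over the opcode sequence, comparing a window to the pattern only on hash hits), reading opcodes with .get so a missing key is just a mismatch.
import Mathlib
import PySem

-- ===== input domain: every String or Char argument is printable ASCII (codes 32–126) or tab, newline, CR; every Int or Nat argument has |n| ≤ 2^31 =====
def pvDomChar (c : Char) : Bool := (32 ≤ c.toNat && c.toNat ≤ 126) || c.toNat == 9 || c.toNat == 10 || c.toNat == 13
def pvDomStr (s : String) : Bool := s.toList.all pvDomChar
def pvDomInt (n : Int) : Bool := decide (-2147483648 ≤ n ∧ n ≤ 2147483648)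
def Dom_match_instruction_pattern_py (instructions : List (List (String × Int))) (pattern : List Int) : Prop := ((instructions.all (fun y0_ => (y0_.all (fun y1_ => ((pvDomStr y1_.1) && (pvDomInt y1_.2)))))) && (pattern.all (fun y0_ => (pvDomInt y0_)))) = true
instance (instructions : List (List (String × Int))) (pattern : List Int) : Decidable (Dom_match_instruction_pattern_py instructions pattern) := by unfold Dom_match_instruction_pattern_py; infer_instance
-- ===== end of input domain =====

-- B replaces A's nested window scan by a single-pass Rabin-Karp rolling-hash search (verified on hash
-- hits), reading opcodes tolerantly with .get; return values agree on Pre_ (exactly the inputs where A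
-- does not raise); on inputs outside Pre_ (A raises) B's .get-based scan simply returns its search result.

-- d['offset'] for an instruction dict (assoc list, first match); Pre_ guarantees the key is present
-- wherever either program reads it.
def pvGetKey (d : List (String × Int)) (k : String) : Int :=
  match d.find? (fun p => p.1 == k) with
  | some p => p.2
  | none => 0

-- d.get('opcode'): some value, or none when the key is missing (Python: None, which != any int)
def pvOp (d : List (String × Int)) : Option Int :=
  (d.find? (fun p => p.1 == "opcode")).map (fun p => p.2)

-- ===== PORT A =====
-- inner loop: for j, expected_opcode in enumerate(pattern): … — the lookup instructions[i+j]['opcode']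
-- is ported as pvOp (Option-valued): on Pre_ the key is present at every index A reads, so this is
-- exact; a missing key (Python: KeyError, excluded by Pre_) is treated as a mismatch.
def pvAinner (instructions : List (List (String × Int))) (i : Nat) : List Int → Nat → Bool
  | [], _ => true
  | e :: rest, j =>
    if pvOp (instructions.getD (i + j) []) ≠ some e then false
    else pvAinner instructions i rest (j + 1)

-- outer loop: for i in range(len(instructions) - len(pattern) + 1): … (second arg = iterations left)
def pvAouter (instructions : List (List (String × Int))) (pattern : List Int) : Nat → Nat → Bool × String
  | _, 0 => (false, "")
  | i, k + 1 =>
    if pvAinner instructions i pattern 0 then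
      (true, "Pattern matched at offset " ++ PySem.Int.toStr (pvGetKey (instructions.getD i []) "offset"))
    else pvAouter instructions pattern (i + 1) k

def match_instruction_pattern_py (instructions : List (List (String × Int))) (pattern : List Int) : Bool × String :=
  if pattern.length > instructions.length then (false, "")
  else pvAouter instructions pattern 0 (instructions.length - pattern.length + 1)

-- ===== PORT B =====
def pvMOD : Int := 2305843009213693951   -- (1 << 61) - 1
def pvBASE : Int := 256                  -- 1 << 8

-- one Horner step of the rolling hash: h = (h * BASE + x) % MOD
def pvH (h x : Int) : Int := PySem.Int.mod (h * pvBASE + x) pvMOD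

-- opcodes = [ins.get('opcode') for ins in instructions]
def pvOps (instructions : List (List (String × Int))) : List (Option Int) :=
  instructions.map pvOp

-- vals = [x if isinstance(x, int) else 0 for x in opcodes]
def pvVals (instructions : List (List (String × Int))) : List Int :=
  (pvOps instructions).map (fun o => o.getD 0)

-- while True: … (last arg = fuel, n - m + 1 at the initial call; the 0 case is never reached)
def pvBloop (instructions : List (List (String × Int))) (pattern : List Int)
    (ops : List (Option Int)) (vals : List Int) (hpat p : Int) : Nat → Int → Nat → Bool × String
  | _, _, 0 => (false, "")
  | i, h, fuel + 1 =>
    if h = hpat ∧ PySem.List.slice ops (some (i : Int)) (some ((i : Int) + (pattern.length : Int))) = pattern.map some then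
      (true, "Pattern matched at offset " ++ PySem.Int.toStr (pvGetKey (instructions.getD i []) "offset"))
    else if i = ops.length - pattern.length then (false, "")
    else pvBloop instructions pattern ops vals hpat p (i + 1)
        (PySem.Int.mod ((h - vals.getD i 0 * p) * pvBASE + vals.getD (i + pattern.length) 0) pvMOD) fuel

def match_instruction_pattern_py_alt (instructions : List (List (String × Int))) (pattern : List Int) : Bool × String :=
  if pattern.length > instructions.length then (false, "")
  else if pattern.length = 0 then
    (true, "Pattern matched at offset " ++ PySem.Int.toStr (pvGetKey (instructions.getD 0 []) "offset"))
  else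
    pvBloop instructions pattern (pvOps instructions) (pvVals instructions)
      (pattern.foldl pvH 0) (PySem.Int.powMod pvBASE (pattern.length - 1) pvMOD) 0
      (((pvVals instructions).take pattern.length).foldl pvH 0)
      (instructions.length - pattern.length + 1)

-- ===== PRECONDITION & SPEC =====
-- helpers for the closed-form description of A's reads:
-- position i+j of window i matches pattern[j] (key present and equal)
def pvMatchAt (instructions : List (List (String × Int))) (pattern : List Int) (i j : Nat) : Bool :=
  pvOp (instructions.getD (i + j) []) == some (pattern.getD j 0)
-- window i is a full match
def pvFullM (instructions : List (List (String × Int))) (pattern : List Int) (i : Nat) : Bool :=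
  (List.range pattern.length).all (fun j => pvMatchAt instructions pattern i j)
-- scanning window i, A hits a missing 'opcode' key after a matching prefix (KeyError)
def pvRaisesAt (instructions : List (List (String × Int))) (pattern : List Int) (i : Nat) : Bool :=
  (List.range pattern.length).any (fun j =>
    (List.range j).all (fun t => pvMatchAt instructions pattern i t) &&
    !(pvOp (instructions.getD (i + j) [])).isSome)
def pvHasOff (instructions : List (List (String × Int))) (i : Nat) : Bool :=
  ((instructions.getD i []).find? (fun p => p.1 == "offset")).isSome
-- A raises a KeyError on 'opcode' during the scan (before any full match)
def pvR1 (instructions : List (List (String × Int))) (pattern : List Int) : Bool :=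
  (List.range (instructions.length - pattern.length + 1)).any (fun i =>
    pvRaisesAt instructions pattern i &&
    (List.range i).all (fun i' => !pvFullM instructions pattern i'))
-- the first fully matching window lacks the 'offset' key (KeyError/IndexError building the message)
def pvR2 (instructions : List (List (String × Int))) (pattern : List Int) : Bool :=
  (List.range (instructions.length - pattern.length + 1)).any (fun i =>
    pvFullM instructions pattern i &&
    (List.range i).all (fun i' => !pvFullM instructions pattern i') &&
    !pvHasOff instructions i)

-- Pre_ excludes exactly the inputs where A raises: a KeyError reading a missing 'opcode' during the
-- scan before any full match (pvR1), or a missing 'offset' (or empty instructions) at the first fully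
-- matching window (pvR2); on every input where A returns, Pre_ holds.
def Pre_match_instruction_pattern_py (instructions : List (List (String × Int))) (pattern : List Int) : Prop :=
  pattern.length ≤ instructions.length →
    pvR1 instructions pattern = false ∧ pvR2 instructions pattern = false
instance (instructions : List (List (String × Int))) (pattern : List Int) : Decidable (Pre_match_instruction_pattern_py instructions pattern) := by
  unfold Pre_match_instruction_pattern_py; infer_instance

def pvWitness_match_instruction_pattern_py : (List (List (String × Int))) × List Int :=
  ([[("opcode", 1), ("offset", 0)]], [1])

def Spec_match_instruction_pattern_py (instructions : List (List (String × Int))) (pattern : List Int) (out : Bool × String) : Prop := out = match_instruction_pattern_py_alt instructions pattern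
instance (instructions : List (List (String × Int))) (pattern : List Int) (out : Bool × String) : Decidable (Spec_match_instruction_pattern_py instructions pattern out) := by unfold Spec_match_instruction_pattern_py; infer_instance

-- ===== CLAIM (what is proved, stated in full; the proofs are below) =====
def Claim_equal_match_instruction_pattern_py : Prop := ∀ (instructions : List (List (String × Int))) (pattern : List Int), Dom_match_instruction_pattern_py instructions pattern → Pre_match_instruction_pattern_py instructions pattern → Spec_match_instruction_pattern_py instructions pattern (match_instruction_pattern_py instructions pattern)

-- ===== LEMMAS AND PROOFS =====
theorem pvMOD_pos : (0 : Int) < pvMOD := by norm_num [pvMOD]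

theorem pvH_eq (h x : Int) : pvH h x = (h * pvBASE + x) % pvMOD := by
  simp [pvH, PySem.Int.mod_eq_emod_of_pos pvMOD_pos]

theorem pvH_congr {a b : Int} (hab : a ≡ b [ZMOD pvMOD]) (x : Int) : pvH a x = pvH b x := by
  rw [pvH_eq, pvH_eq]
  exact (hab.mul_right pvBASE).add_right x

theorem pvH_modeq (a x : Int) : pvH a x ≡ a * pvBASE + x [ZMOD pvMOD] := by
  rw [pvH_eq]
  exact (Int.emod_emod_of_dvd _ dvd_rfl : _)

theorem pvfold_congr (l : List Int) : ∀ {a b : Int}, a ≡ b [ZMOD pvMOD] →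
    l.foldl pvH a ≡ l.foldl pvH b [ZMOD pvMOD] := by
  induction l with
  | nil => intro a b h; exact h
  | cons x l ih =>
      intro a b h
      simp only [List.foldl_cons, pvH_congr h x]
      exact Int.ModEq.refl _

theorem pvfold_shift (l : List Int) : ∀ (a : Int),
    l.foldl pvH a ≡ a * pvBASE ^ l.length + l.foldl pvH 0 [ZMOD pvMOD] := by
  induction l with
  | nil => intro a; simp
  | cons x l ih =>
      intro a
      have hx : pvH 0 x ≡ x [ZMOD pvMOD] := by
        have := pvH_modeq 0 x
        simpa using this
      simp only [List.foldl_cons, List.length_cons]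
      calc l.foldl pvH (pvH a x)
          ≡ l.foldl pvH (a * pvBASE + x) [ZMOD pvMOD] := pvfold_congr l (pvH_modeq a x)
        _ ≡ (a * pvBASE + x) * pvBASE ^ l.length + l.foldl pvH 0 [ZMOD pvMOD] := ih _
        _ = a * pvBASE ^ (l.length + 1) + (x * pvBASE ^ l.length + l.foldl pvH 0) := by ring
        _ ≡ a * pvBASE ^ (l.length + 1) + l.foldl pvH x [ZMOD pvMOD] :=
              Int.ModEq.add_left _ (ih x).symm
        _ ≡ a * pvBASE ^ (l.length + 1) + l.foldl pvH (pvH 0 x) [ZMOD pvMOD] :=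
              Int.ModEq.add_left _ (pvfold_congr l hx.symm)

-- the rolling step: from the hash of the window at i to the hash of the window at i+1
theorem pvRoll (vs : List Int) (m i : Nat) (hm : 1 ≤ m) (hle : i + 1 + m ≤ vs.length) :
    PySem.Int.mod ((((vs.drop i).take m).foldl pvH 0 - vs.getD i 0 * PySem.Int.powMod pvBASE (m - 1) pvMOD) * pvBASE
        + vs.getD (i + m) 0) pvMOD
      = ((vs.drop (i + 1)).take m).foldl pvH 0 := by
  have hi : i < vs.length := by omega
  have him : i + m < vs.length := by omega
  have hp : PySem.Int.powMod pvBASE (m - 1) pvMOD ≡ pvBASE ^ (m - 1) [ZMOD pvMOD] := by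
    rw [PySem.Int.powMod_eq, PySem.Int.mod_eq_emod_of_pos pvMOD_pos]
    exact (Int.emod_emod_of_dvd _ dvd_rfl : _)
  set w : List Int := (vs.drop (i + 1)).take (m - 1) with hw
  have hwlen : w.length = m - 1 := by
    simp [hw, List.length_take, List.length_drop]
    omega
  -- window at i is vs[i] :: w
  have hWi : (vs.drop i).take m = vs[i] :: w := by
    obtain ⟨m', rfl⟩ : ∃ m', m = m' + 1 := ⟨m - 1, by omega⟩
    rw [List.drop_eq_getElem_cons hi, List.take_succ_cons]
    simp [hw]
  -- window at i+1 is w ++ [vs[i+m]]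
  have hWi1 : (vs.drop (i + 1)).take m = w ++ [vs[i + m]] := by
    obtain ⟨m', rfl⟩ : ∃ m', m = m' + 1 := ⟨m - 1, by omega⟩
    have hm' : m' < (vs.drop (i + 1)).length := by
      rw [List.length_drop]; omega
    have hidx : (vs.drop (i + 1))[m'] = vs[i + (m' + 1)] := by
      rw [List.getElem_drop]
      congr 1
      omega
    rw [List.take_add_one, List.getElem?_eq_getElem hm', hidx]
    simp [hw]
  rw [hWi, hWi1, List.foldl_append]
  rw [List.getD_eq_getElem vs 0 hi, List.getD_eq_getElem vs 0 him]
  rw [PySem.Int.mod_eq_emod_of_pos pvMOD_pos]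
  simp only [List.foldl_cons, List.foldl_nil]
  rw [pvH_eq (w.foldl pvH 0) (vs[i + m])]
  -- both sides are emods; show the arguments are congruent mod pvMOD
  have hx : pvH 0 (vs[i]) ≡ vs[i] [ZMOD pvMOD] := by
    have := pvH_modeq 0 (vs[i]); simpa using this
  have hhead : w.foldl pvH (pvH 0 vs[i]) ≡ vs[i] * pvBASE ^ (m - 1) + w.foldl pvH 0 [ZMOD pvMOD] := by
    calc w.foldl pvH (pvH 0 vs[i])
        ≡ w.foldl pvH (vs[i]) [ZMOD pvMOD] := pvfold_congr w hx
      _ ≡ vs[i] * pvBASE ^ w.length + w.foldl pvH 0 [ZMOD pvMOD] := pvfold_shift w _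
      _ = vs[i] * pvBASE ^ (m - 1) + w.foldl pvH 0 := by rw [hwlen]
  have h1 : w.foldl pvH (pvH 0 vs[i]) - vs[i] * PySem.Int.powMod pvBASE (m - 1) pvMOD
      ≡ (vs[i] * pvBASE ^ (m - 1) + w.foldl pvH 0) - vs[i] * pvBASE ^ (m - 1) [ZMOD pvMOD] :=
    Int.ModEq.sub hhead (hp.mul_left _)
  have h2 : (vs[i] * pvBASE ^ (m - 1) + w.foldl pvH 0) - vs[i] * pvBASE ^ (m - 1) = w.foldl pvH 0 := by ring
  exact ((h1.trans (by rw [h2])).mul_right pvBASE).add_right _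

-- A's inner loop is the window-equality test on the opcode (Option) sequence
theorem pvAinner_eq (instructions : List (List (String × Int))) (pat : List Int) :
    ∀ (i j : Nat), i + j + pat.length ≤ instructions.length →
      (pvAinner instructions i pat j = true ↔
        (((pvOps instructions).drop (i + j)).take pat.length = pat.map some)) := by
  induction pat with
  | nil => intro i j h; simp [pvAinner]
  | cons e rest ih =>
      intro i j h
      simp only [List.length_cons] at h
      have hij : i + j < instructions.length := by omega
      have hij' : i + j < (pvOps instructions).length := by
        simp [pvOps]; exact hij
      have hget : (pvOps instructions)[i + j] = pvOp (instructions.getD (i + j) []) := by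
        simp only [pvOps]
        rw [List.getElem_map, List.getD_eq_getElem instructions [] hij]
      simp only [List.length_cons, List.map_cons]
      rw [List.drop_eq_getElem_cons hij', List.take_succ_cons]
      simp only [pvAinner]
      by_cases hne : pvOp (instructions.getD (i + j) []) ≠ some e
      · rw [if_pos hne]
        simp only [Bool.false_eq_true, false_iff, List.cons.injEq, not_and, hget]
        intro hc
        exact absurd hc hne
      · rw [not_ne_iff] at hne
        rw [if_neg (fun hc => hc hne)]
        have hrec := ih i (j + 1) (by omega)
        have harr : i + (j + 1) = i + j + 1 := by omega
        rw [harr] at hrec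
        simp only [List.cons.injEq, hget, hne, true_and]
        exact hrec

-- the val window equals the pattern whenever the opcode window does
theorem pvVals_window (instructions : List (List (String × Int))) (pat : List Int) (i : Nat)
    (hW : ((pvOps instructions).drop i).take pat.length = pat.map some) :
    (((pvVals instructions).drop i).take pat.length) = pat := by
  simp only [pvVals]
  rw [← List.map_drop, ← List.map_take, hW, List.map_map]
  simp

-- the two loops agree, given the rolling-hash invariant as the seed
theorem pvLoop_eq (instructions : List (List (String × Int))) (pattern : List Int)
    (hm : 1 ≤ pattern.length) (hmn : pattern.length ≤ instructions.length) :
    ∀ (k i : Nat), i + k = instructions.length - pattern.length + 1 →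
      pvAouter instructions pattern i k =
        pvBloop instructions pattern (pvOps instructions) (pvVals instructions)
          (pattern.foldl pvH 0) (PySem.Int.powMod pvBASE (pattern.length - 1) pvMOD) i
          ((((pvVals instructions).drop i).take pattern.length).foldl pvH 0) k := by
  intro k
  induction k with
  | zero => intro i hik; rfl
  | succ k ih =>
      intro i hik
      have hopslen : (pvOps instructions).length = instructions.length := by
        simp [pvOps]
      have hvalslen : (pvVals instructions).length = instructions.length := by
        simp [pvVals, pvOps]
      have him : i + pattern.length ≤ instructions.length := by omega
      have hinner := pvAinner_eq instructions pattern i 0 (by omega)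
      rw [Nat.add_zero] at hinner
      have hslice : PySem.List.slice (pvOps instructions) (some (i : Int)) (some ((i : Int) + (pattern.length : Int)))
          = ((pvOps instructions).drop i).take pattern.length :=
        PySem.List.slice_natCast_add _ i pattern.length
      simp only [pvAouter, pvBloop]
      by_cases hW : ((pvOps instructions).drop i).take pattern.length = pattern.map some
      · rw [if_pos (hinner.mpr hW)]
        rw [if_pos ⟨by rw [pvVals_window instructions pattern i hW], by rw [hslice, hW]⟩]
      · rw [if_neg (fun hc => hW (hinner.mp hc))]
        rw [if_neg (fun hc => hW (by rw [← hslice]; exact hc.2))]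
        by_cases hend : i = (pvOps instructions).length - pattern.length
        · rw [if_pos hend]
          have hk0 : k = 0 := by
            rw [hopslen] at hend; omega
          subst hk0
          rfl
        · rw [if_neg hend]
          have hi1 : i + 1 + pattern.length ≤ instructions.length := by
            rw [hopslen] at hend; omega
          have hroll := pvRoll (pvVals instructions) pattern.length i hm
            (by rw [hvalslen]; exact hi1)
          rw [hroll]
          exact ih (i + 1) (by omega)

-- ===== VERDICT (by name: the statement is the Claim_ definition above) =====
theorem match_instruction_pattern_py_spec : Claim_equal_match_instruction_pattern_py := by
  intro instructions pattern _dom _pre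
  unfold Spec_match_instruction_pattern_py
  unfold match_instruction_pattern_py match_instruction_pattern_py_alt
  by_cases hgt : pattern.length > instructions.length
  · rw [if_pos hgt, if_pos hgt]
  · rw [if_neg hgt, if_neg hgt]
    rw [not_lt] at hgt
    by_cases hm0 : pattern.length = 0
    · rw [if_pos hm0]
      have hpat : pattern = [] := List.eq_nil_of_length_eq_zero hm0
      subst hpat
      simp [pvAouter, pvAinner]
    · rw [if_neg hm0]
      have := pvLoop_eq instructions pattern (by omega) hgt (instructions.length - pattern.length + 1) 0 (by omega)
      rw [List.drop_zero] at this
      exact this
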